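-- pv_equiv track=rewrite | github.com/mlcommons/hpc | openfold/openfold/data/mmcif.py | _get_chain_ids_mapping
-- ===== SOURCE A (Python) =====
-- from typing import Dict, List, Tuple
--
-- _MMCIFChainId = str
--
-- _AuthorChainId = str
--
-- _ChainIdsMapping = Dict[_MMCIFChainId, _AuthorChainId]
--
-- _AtomSiteList = List[dict]
--
-- def _get_chain_ids_mapping(atom_site_list: _AtomSiteList) -> _ChainIdsMapping:
--     chain_ids_mapping: _ChainIdsMapping = {}
--     for atom_site in atom_site_list:
--         author_chain_id: _AuthorChainId = atom_site["author_chain_id"]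
--         mmcif_chain_id: _MMCIFChainId = atom_site["mmcif_chain_id"]
--         if mmcif_chain_id in chain_ids_mapping:
--             assert chain_ids_mapping[mmcif_chain_id] == author_chain_id
--         else:
--             chain_ids_mapping[mmcif_chain_id] = author_chain_id
--     # Return mapping from internal mmCIF chain ids
--     # to chain ids used by the authors / Biopython.
--     return chain_ids_mapping
-- ===== SOURCE B (Python) =====
-- def _get_chain_ids_mapping(atom_site_list):
--     # Pass 1: gather, for each mmcif chain id (first-seen order), the set of
--     # author chain ids observed for it.
--     author_ids_per_chain = {}
--     for atom_site in atom_site_list: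
--         author_ids_per_chain.setdefault(
--             atom_site["mmcif_chain_id"], set()
--         ).add(atom_site["author_chain_id"])
--     # Pass 2: validate each group is consistent and build the mapping.
--     chain_ids_mapping = {}
--     for mmcif_chain_id, author_ids in author_ids_per_chain.items():
--         assert len(author_ids) == 1
--         (author_id,) = author_ids
--         chain_ids_mapping[mmcif_chain_id] = author_id
--     return chain_ids_mapping
-- ===== Notes on version B (the rewrite author's own statement) =====
-- stated objective: alternative
-- what changed: Replaces the interleaved check-and-insert loop by a gather-then-validate decomposition: a first pass groups all author ids per mmcif id into a dict of sets, a second pass asserts each group is a singleton and builds the mapping.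
import Mathlib
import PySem

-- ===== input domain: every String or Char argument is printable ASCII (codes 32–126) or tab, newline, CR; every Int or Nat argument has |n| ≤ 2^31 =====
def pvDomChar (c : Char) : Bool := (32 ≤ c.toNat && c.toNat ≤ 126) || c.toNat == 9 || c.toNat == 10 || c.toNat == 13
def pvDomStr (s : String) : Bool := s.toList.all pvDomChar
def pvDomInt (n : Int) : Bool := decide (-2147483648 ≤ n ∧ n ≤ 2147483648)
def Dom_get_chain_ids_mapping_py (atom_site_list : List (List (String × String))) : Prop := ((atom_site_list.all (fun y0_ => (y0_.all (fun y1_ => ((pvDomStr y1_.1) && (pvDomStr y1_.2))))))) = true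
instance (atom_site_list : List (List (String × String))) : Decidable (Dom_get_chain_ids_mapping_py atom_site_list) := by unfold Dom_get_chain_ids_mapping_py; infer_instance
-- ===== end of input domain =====

-- B replaces A's interleaved check-and-insert loop by a gather-then-validate decomposition:
-- pass 1 groups all author ids per mmcif id, pass 2 validates singletons and builds the mapping; same cost.


-- shared input decoding: atom_site["k"], the Python dict lookup on an atom_site
-- (exact also for duplicate keys in the assoc list, which dict() overwrites in place;
--  the default "" is only reached when the key is absent, which Pre_ excludes)
def siteGet (site : List (String × String)) (k : String) : String :=
  (PySem.Dict.ofList site).getD k ""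

-- ===== PORT A =====
def get_chain_ids_mapping_py (atom_site_list : List (List (String × String))) : List (String × String) :=
  (atom_site_list.foldl
    (fun d site =>
      let author_chain_id := siteGet site "author_chain_id"
      let mmcif_chain_id := siteGet site "mmcif_chain_id"
      if d.contains mmcif_chain_id then
        d  -- assert chain_ids_mapping[mmcif_chain_id] == author_chain_id: cannot fail inside Pre_
      else
        d.insert mmcif_chain_id author_chain_id)
    PySem.Dict.empty).items

-- ===== PORT B =====
-- pass 1: author_ids_per_chain.setdefault(m, set()).add(a)  ==  modify m ∅ (·.add a);
-- pass 2: 'assert len(author_ids) == 1' cannot fail inside Pre_; '(author_id,) = author_ids'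
-- takes the set's sole element (headD "").
def get_chain_ids_mapping_py_alt (atom_site_list : List (List (String × String))) : List (String × String) :=
  let author_ids_per_chain : PySem.Dict String (PySem.Set String) :=
    atom_site_list.foldl
      (fun g site =>
        g.modify (siteGet site "mmcif_chain_id") (PySem.Set.ofList [])
          (fun s => PySem.Set.add s (siteGet site "author_chain_id")))
      PySem.Dict.empty
  (author_ids_per_chain.items.foldl
    (fun mp p => mp.insert p.1 (p.2.headD ""))
    PySem.Dict.empty).items

-- ===== PRECONDITION & SPEC =====
-- Pre_ excludes exactly the inputs where the Python A raises: a site missing one of the two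
-- keys (KeyError) or two sites giving one mmcif id two distinct author ids (AssertionError).
def Pre_get_chain_ids_mapping_py (atom_site_list : List (List (String × String))) : Prop :=
  (∀ site ∈ atom_site_list,
      (PySem.Dict.ofList site).contains "author_chain_id" = true ∧
      (PySem.Dict.ofList site).contains "mmcif_chain_id" = true) ∧
  (∀ s ∈ atom_site_list, ∀ t ∈ atom_site_list,
      siteGet s "mmcif_chain_id" = siteGet t "mmcif_chain_id" →
      siteGet s "author_chain_id" = siteGet t "author_chain_id")
instance (atom_site_list : List (List (String × String))) : Decidable (Pre_get_chain_ids_mapping_py atom_site_list) := by unfold Pre_get_chain_ids_mapping_py; infer_instance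

def pvWitness_get_chain_ids_mapping_py : (List (List (String × String))) :=
  [[("author_chain_id", "A"), ("mmcif_chain_id", "1")],
   [("author_chain_id", "A"), ("mmcif_chain_id", "1")],
   [("author_chain_id", "B"), ("mmcif_chain_id", "2")]]

def Spec_get_chain_ids_mapping_py (atom_site_list : List (List (String × String))) (out : List (String × String)) : Prop := out = get_chain_ids_mapping_py_alt atom_site_list
instance (atom_site_list : List (List (String × String))) (out : List (String × String)) : Decidable (Spec_get_chain_ids_mapping_py atom_site_list out) := by unfold Spec_get_chain_ids_mapping_py; infer_instance

-- ===== CLAIM (what is proved, stated in full; the proofs are below) =====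
def Claim_equal_get_chain_ids_mapping_py : Prop := ∀ (atom_site_list : List (List (String × String))), Dom_get_chain_ids_mapping_py atom_site_list → Pre_get_chain_ids_mapping_py atom_site_list → Spec_get_chain_ids_mapping_py atom_site_list (get_chain_ids_mapping_py atom_site_list)

-- ===== LEMMAS AND PROOFS =====

-- A's loop step and B's first-pass step, named for the proofs
def stepA (d : PySem.Dict String String) (site : List (String × String)) : PySem.Dict String String :=
  if d.contains (siteGet site "mmcif_chain_id") then d
  else d.insert (siteGet site "mmcif_chain_id") (siteGet site "author_chain_id")

def stepB (g : PySem.Dict String (PySem.Set String)) (site : List (String × String)) : PySem.Dict String (PySem.Set String) :=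
  g.modify (siteGet site "mmcif_chain_id") (PySem.Set.ofList [])
    (fun s => PySem.Set.add s (siteGet site "author_chain_id"))

lemma map_replace_self {ν : Type} (items : List (String × ν)) (m : String) (x : ν)
    (hmem : (m, x) ∈ items) (hnd : (items.map Prod.fst).Nodup) :
    items.map (fun p => if (p.1 == m) = true then (m, x) else p) = items := by
  have hinj := List.inj_on_of_nodup_map hnd
  conv_rhs => rw [← List.map_id items]
  apply List.map_congr_left
  intro p hp
  by_cases hpm : p.1 = m
  · have : p = (m, x) := hinj hp hmem (by simp [hpm])
    simp [this]
  · simp [hpm]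

lemma keys_of_items_map (d : PySem.Dict String String) (g : PySem.Dict String (PySem.Set String))
    (hg : g.items = d.items.map (fun p => (p.1, ([p.2] : PySem.Set String)))) :
    g.keys = d.keys := by
  simp [PySem.Dict.keys, hg, List.map_map, Function.comp]

lemma gather_eq (l : List (List (String × String))) (d : PySem.Dict String String)
    (g : PySem.Dict String (PySem.Set String))
    (hnd : d.keys.Nodup)
    (hg : g.items = d.items.map (fun p => (p.1, ([p.2] : PySem.Set String))))
    (hc : ∀ s ∈ l, ∀ q ∈ d.items, siteGet s "mmcif_chain_id" = q.1 → siteGet s "author_chain_id" = q.2)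
    (hl : ∀ s ∈ l, ∀ t ∈ l, siteGet s "mmcif_chain_id" = siteGet t "mmcif_chain_id" →
      siteGet s "author_chain_id" = siteGet t "author_chain_id") :
    (l.foldl stepB g).items = (l.foldl stepA d).items.map (fun p => (p.1, ([p.2] : PySem.Set String)))
      ∧ (l.foldl stepA d).keys.Nodup := by
  induction l generalizing d g with
  | nil => exact ⟨hg, hnd⟩
  | cons s rest ih =>
    simp only [List.foldl_cons]
    set m := siteGet s "mmcif_chain_id" with hm
    set a := siteGet s "author_chain_id" with ha
    have hgk : g.keys = d.keys := keys_of_items_map d g hg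
    by_cases h : d.contains m = true
    · -- key already present: both steps are no-ops
      have hmk : m ∈ d.keys := (PySem.Dict.contains_iff_mem_keys d m).mp h
      obtain ⟨v, hq⟩ := (by simpa [PySem.Dict.keys] using hmk : ∃ v, (m, v) ∈ d.items)
      have hav : a = v := hc s (by simp) (m, v) hq rfl
      have hgm : (m, ([v] : PySem.Set String)) ∈ g.items := by
        rw [hg]; exact List.mem_map.mpr ⟨(m, v), hq, rfl⟩
      have hgnd : g.keys.Nodup := by rw [hgk]; exact hnd
      have hgetD : g.getD m (PySem.Set.ofList []) = [v] :=
        PySem.Dict.getD_of_mem_items g hgm hgnd _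
      have hgc : g.contains m = true := by
        rw [PySem.Dict.contains_iff_mem_keys, hgk]; exact hmk
      have hstepB : stepB g s = g := by
        apply PySem.Dict.ext
        rw [stepB, PySem.Dict.modify, ← hm, hgetD]
        have : PySem.Set.add ([v] : PySem.Set String) a = [v] := by
          simp [PySem.Set.add, hav, PySem.Set.contains]
        rw [← ha, this, PySem.Dict.items_insert_of_contains g _ hgc]
        exact map_replace_self g.items m [v] hgm (by simpa [PySem.Dict.keys] using hgnd)
      have hstepA : stepA d s = d := by simp [stepA, ← hm, h]
      rw [hstepA, hstepB]
      exact ih d g hnd hg (fun s' hs' => hc s' (by simp [hs'])) (fun s' hs' t' ht' => hl s' (by simp [hs']) t' (by simp [ht']))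
    · -- fresh key: both append
      have h' : d.contains m = false := by simpa using h
      have hgc : g.contains m = false := by
        have := PySem.Dict.contains_iff_mem_keys g m
        have hd := PySem.Dict.contains_iff_mem_keys d m
        rw [hgk] at this
        cases hgcv : g.contains m
        · rfl
        · exact absurd (hd.mpr (this.mp hgcv)) (by simp [h'])
      have hstepA : stepA d s = d.insert m a := by simp [stepA, ← hm, ← ha, h']
      have hstepB : stepB g s = g.insert m ([a] : PySem.Set String) := by
        rw [stepB, PySem.Dict.modify, ← hm, ← ha, PySem.Dict.getD_of_not_contains g _ hgc]
        rfl
      rw [hstepA, hstepB]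
      have hitems : (d.insert m a).items = d.items ++ [(m, a)] :=
        PySem.Dict.items_insert_of_not_contains d a h'
      have hgitems : (g.insert m ([a] : PySem.Set String)).items = g.items ++ [(m, ([a] : PySem.Set String))] :=
        PySem.Dict.items_insert_of_not_contains g _ hgc
      apply ih
      · exact PySem.Dict.nodup_keys_insert d m a hnd
      · rw [hitems, hgitems, hg]; simp
      · intro s' hs' q hq hq1
        rw [hitems] at hq
        rcases List.mem_append.mp hq with hq | hq
        · exact hc s' (by simp [hs']) q hq hq1
        · simp at hq; subst hq
          exact hl s' (by simp [hs']) s (by simp) hq1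
      · exact fun s' hs' t' ht' => hl s' (by simp [hs']) t' (by simp [ht'])

lemma portA_eq (l : List (List (String × String))) :
    get_chain_ids_mapping_py l = (l.foldl stepA PySem.Dict.empty).items := by
  rfl

lemma portB_eq (l : List (List (String × String))) :
    get_chain_ids_mapping_py_alt l =
      ((l.foldl stepB PySem.Dict.empty).items.foldl
        (fun mp p => mp.insert p.1 (p.2.headD "")) PySem.Dict.empty).items := rfl

theorem final : ∀ (l : List (List (String × String))),
    (∀ s ∈ l, ∀ t ∈ l, siteGet s "mmcif_chain_id" = siteGet t "mmcif_chain_id" →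
      siteGet s "author_chain_id" = siteGet t "author_chain_id") →
    get_chain_ids_mapping_py l = get_chain_ids_mapping_py_alt l := by
  intro l hcons
  obtain ⟨hitems, hnd⟩ := gather_eq l PySem.Dict.empty PySem.Dict.empty
    (by simp [PySem.Dict.keys, PySem.Dict.empty])
    (by simp [PySem.Dict.empty])
    (by simp [PySem.Dict.empty])
    hcons
  rw [portA_eq, portB_eq]
  rw [PySem.Dict.items_foldl_insert_fresh _ _ _ _
      (fun p _ => by simp [PySem.Dict.contains_empty])
      (by rw [hitems]; simpa [PySem.Dict.keys, List.map_map, Function.comp] using hnd)]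
  rw [hitems, List.map_map]
  show _ = [] ++ _
  rw [List.nil_append]
  exact ((List.map_congr_left (fun p _ => rfl)).trans (List.map_id _)).symm

-- ===== VERDICT (by name: the statement is the Claim_ definition above) =====
theorem get_chain_ids_mapping_py_spec : Claim_equal_get_chain_ids_mapping_py := by
  intro l _ hpre
  show get_chain_ids_mapping_py l = get_chain_ids_mapping_py_alt l
  exact final l hpre.2
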